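-- pv_equiv track=rewrite | github.com/techeer-sv/Surviving-the-Code | jimin/week5/BJ_24482.py | dfs_depths
-- ===== SOURCE A (Python) =====
-- def dfs_depths(N, M, R, edges):
--     """
--     N : 정점(노드)의 개수
--     M : 간선의 개수
--     R : 시작 정점 번호
--     edges : (u, v) 형태의 간선 리스트 (무방향)
--
--     반환값: 크기 N의 리스트 (1번 정점부터 N번 정점까지의 깊이)
--            방문 불가능한 정점은 -1
--     """
--
--     # 1. 인접 리스트(Adjacency List) 생성
--     graph = [[] for _ in range(N + 1)]  # 0번 인덱스는 사용하지 않음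
--     for u, v in edges:
--         graph[u].append(v)
--         graph[v].append(u)  # 무방향 그래프이므로 양방향 추가
--
--     # 2. 문제 조건: "인접 정점은 내림차순으로 방문"
--     #    따라서 정렬을 미리 해둠
--     for i in range(1, N + 1):
--         graph[i].sort(reverse=True)
--
--     # 3. 깊이 배열 초기화
--     depth = [-1] * (N + 1)
--     # depth[i] = 시작 정점 R에서 i번 정점까지의 깊이
--     # 아직 방문하지 않은 노드는 -1로 유지
--
--     # 4. DFS 함수 정의
--     def dfs(node, d):
--         """
--         node : 현재 탐색 중인 노드
--         d    : 현재 노드의 깊이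
--         """
--         depth[node] = d  # 현재 노드의 깊이를 기록
--
--         # 현재 노드에 연결된 인접 노드들 탐색
--         for nxt in graph[node]:
--             if depth[nxt] == -1:  # 아직 방문하지 않은 노드라면
--                 dfs(nxt, d + 1)  # 깊이를 하나 증가시켜 재귀 호출
--
--     # 5. DFS 시작 (시작 정점 R에서 깊이 0)
--     dfs(R, 0)
--
--     # 6. 1번 정점부터 N번 정점까지의 깊이만 반환
--     return depth[1:]
-- ===== SOURCE B (Python) =====
-- def dfs_depths(N, M, R, edges):
--     # Same adjacency construction as the problem demands (descending neighbor order),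
--     # but the depths are computed with an explicit stack instead of recursion.
--     graph = [[] for _ in range(N + 1)]
--     for u, v in edges:
--         graph[u].append(v)
--         graph[v].append(u)
--     for i in range(1, N + 1):
--         graph[i].sort(reverse=True)
--
--     depth = [-1] * (N + 1)
--     stack = [(R, 0)]
--     while stack:
--         node, d = stack.pop()
--         if depth[node] != -1:
--             continue
--         depth[node] = d
--         for nxt in reversed(graph[node]):
--             if depth[nxt] == -1:
--                 stack.append((nxt, d + 1))
--     return depth[1:]
-- ===== Notes on version B (the rewrite author's own statement) =====
-- stated objective: alternative
-- what changed: The recursive DFS (with a closure mutating the depth array) is replaced by an explicit stack of (node, depth) pairs with mark-on-pop and reversed-order pushes, which reproduces the recursive preorder depth assignment without Python recursion.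
import Mathlib
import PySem

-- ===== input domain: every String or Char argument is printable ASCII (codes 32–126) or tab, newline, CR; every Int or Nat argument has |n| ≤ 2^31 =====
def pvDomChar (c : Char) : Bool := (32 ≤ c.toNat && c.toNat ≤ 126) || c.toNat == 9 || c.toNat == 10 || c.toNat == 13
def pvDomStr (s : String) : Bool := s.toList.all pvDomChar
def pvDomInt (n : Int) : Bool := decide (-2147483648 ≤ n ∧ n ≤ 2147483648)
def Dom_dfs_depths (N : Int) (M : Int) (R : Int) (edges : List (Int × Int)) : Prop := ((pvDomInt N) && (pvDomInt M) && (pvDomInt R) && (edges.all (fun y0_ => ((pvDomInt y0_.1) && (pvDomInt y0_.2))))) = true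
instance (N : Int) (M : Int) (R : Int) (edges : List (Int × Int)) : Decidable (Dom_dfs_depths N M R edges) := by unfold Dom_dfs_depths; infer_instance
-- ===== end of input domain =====

-- B replaces A's recursive DFS closure by an explicit stack of (node, depth) pairs (mark on pop,
-- reversed-order pushes), reproducing the same preorder depth assignment; same return value, no speed claim.
-- Both programs build the same adjacency list first (the problem fixes the descending neighbour order),
-- so that construction is a shared helper of the two ports.

-- list get/set with Python's negative-index wraparound: PySem.List.pyGetD / pySetD (exact under
-- Pre_dfs_depths, which keeps every index Python touches in range).

-- shared by both ports: the adjacency-list construction (identical lines in Source A and Source B)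
def pvGraph (N : Int) (edges : List (Int × Int)) : List (List Int) :=
  let g0 : List (List Int) := List.replicate (N + 1).toNat []
  let g1 := edges.foldl (fun g e =>
    let ga := PySem.List.pySetD g e.1 (PySem.List.pyGetD g e.1 [] ++ [e.2])
    PySem.List.pySetD ga e.2 (PySem.List.pyGetD ga e.2 [] ++ [e.1])) g0
  (PySem.List.pyRange 1 (N + 1) 1).foldl
    (fun g i => PySem.List.pySetD g i (PySem.List.sorted (PySem.List.pyGetD g i []) (fun x => x) true)) g1

-- ===== PORT A =====
-- A's recursive dfs; the fuel argument is a totality guard only (the top call passes more fuel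
-- than the number of unvisited vertices, so the 0-fuel branch is never reached).
mutual
def pvDfs (g : List (List Int)) (f : Nat) (node : Int) (d : Int) (depth : List Int) : List Int :=
  match f with
  | 0 => depth
  | f' + 1 => pvDfsList g f' (PySem.List.pyGetD g node []) d (PySem.List.pySetD depth node d)
  termination_by (f, 0)

def pvDfsList (g : List (List Int)) (f : Nat) (lst : List Int) (d : Int) (depth : List Int) : List Int :=
  match lst with
  | [] => depth
  | nxt :: rest =>
      if PySem.List.pyGetD depth nxt (-2) = -1 then
        pvDfsList g f rest d (pvDfs g f nxt (d + 1) depth)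
      else pvDfsList g f rest d depth
  termination_by (f, lst.length + 1)
end

def dfs_depths (N : Int) (M : Int) (R : Int) (edges : List (Int × Int)) : List Int :=
  let g := pvGraph N edges
  let depth : List Int := List.replicate (N + 1).toNat (-1)
  PySem.List.slice (pvDfs g (depth.length + 1) R 0 depth) (some 1) none

-- ===== PORT B =====
-- B's explicit stack loop (head of the list = top of the stack); fuel is again only a totality guard.
def pvRun (g : List (List Int)) (f : Nat) (depth : List Int) (st : List (Int × Int)) : List Int :=
  match st with
  | [] => depth
  | (node, d) :: st' =>
      if PySem.List.pyGetD depth node (-2) ≠ -1 then pvRun g f depth st'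
      else
        match f with
        | 0 => depth
        | f' + 1 =>
          let depth' := PySem.List.pySetD depth node d
          pvRun g f' depth'
            ((PySem.List.pyGetD g node []).reverse.foldl
              (fun s nxt => if PySem.List.pyGetD depth' nxt (-2) = -1 then (nxt, d + 1) :: s else s) st')
termination_by (f, st.length)

def dfs_depths_alt (N : Int) (M : Int) (R : Int) (edges : List (Int × Int)) : List Int :=
  let g := pvGraph N edges
  let depth : List Int := List.replicate (N + 1).toNat (-1)
  PySem.List.slice (pvRun g (depth.length + 1) depth [(R, 0)]) (some 1) none

-- ===== PRECONDITION & SPEC =====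
-- Pre_ = exactly the inputs where Python A returns (no IndexError): N ≥ 0 and the start vertex and
-- every edge endpoint a valid (possibly negative, Python-wraparound) index into the N+1 lists.
def Pre_dfs_depths (N : Int) (M : Int) (R : Int) (edges : List (Int × Int)) : Prop :=
  0 ≤ N ∧ (-(N + 1) ≤ R ∧ R ≤ N) ∧
    ∀ e ∈ edges, (-(N + 1) ≤ e.1 ∧ e.1 ≤ N) ∧ (-(N + 1) ≤ e.2 ∧ e.2 ≤ N)
instance (N : Int) (M : Int) (R : Int) (edges : List (Int × Int)) : Decidable (Pre_dfs_depths N M R edges) := by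
  unfold Pre_dfs_depths; infer_instance

def pvWitness_dfs_depths : Int × Int × Int × (List (Int × Int)) := (3, 2, 1, [(1, 2), (2, 3)])

def Spec_dfs_depths (N : Int) (M : Int) (R : Int) (edges : List (Int × Int)) (out : List Int) : Prop := out = dfs_depths_alt N M R edges
instance (N : Int) (M : Int) (R : Int) (edges : List (Int × Int)) (out : List Int) : Decidable (Spec_dfs_depths N M R edges out) := by unfold Spec_dfs_depths; infer_instance

-- ===== CLAIM (what is proved, stated in full; the proofs are below) =====
def Claim_equal_dfs_depths : Prop := ∀ (N : Int) (M : Int) (R : Int) (edges : List (Int × Int)), Dom_dfs_depths N M R edges → Pre_dfs_depths N M R edges → Spec_dfs_depths N M R edges (dfs_depths N M R edges)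

-- ===== LEMMAS AND PROOFS =====

-- number of still-unvisited slots
def pvCN (xs : List Int) : Nat := xs.countP (fun z => z == -1)
-- every pending stack entry carries a nonnegative depth
def pvOK (S : List (Int × Int)) : Prop := ∀ p ∈ S, 0 ≤ p.2

lemma pvIdx_lt {n : Nat} {i : Int} {k : Nat} (h : PySem.List.pyIdx? n i = some k) : k < n := by
  simp only [PySem.List.pyIdx?] at h
  split_ifs at h with h1 h2 h3 <;> simp only [Option.some.injEq] at h <;> omega

lemma pvGet_some {α : Type} (xs : List α) (i : Int) (d : α) {k : Nat}
    (h : PySem.List.pyIdx? xs.length i = some k) : PySem.List.pyGetD xs i d = xs.getD k d := by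
  have hk := pvIdx_lt h
  simp [PySem.List.pyGetD, PySem.List.pyGet?, h, List.getD_eq_getElem?_getD]

lemma pvGet_none {α : Type} (xs : List α) (i : Int) (d : α)
    (h : PySem.List.pyIdx? xs.length i = none) : PySem.List.pyGetD xs i d = d := by
  simp [PySem.List.pyGetD, PySem.List.pyGet?, h]

lemma pvSet_some {α : Type} (xs : List α) (i : Int) (v : α) {k : Nat}
    (h : PySem.List.pyIdx? xs.length i = some k) : PySem.List.pySetD xs i v = xs.set k v := by
  simp [PySem.List.pySetD, PySem.List.pySet?, h]

lemma pvSet_none {α : Type} (xs : List α) (i : Int) (v : α)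
    (h : PySem.List.pyIdx? xs.length i = none) : PySem.List.pySetD xs i v = xs := by
  simp [PySem.List.pySetD, PySem.List.pySet?, h]

lemma pvCN_pos (xs : List Int) (i : Int) (h : PySem.List.pyGetD xs i (-2) = -1) : 1 ≤ pvCN xs := by
  cases hidx : PySem.List.pyIdx? xs.length i with
  | none => rw [pvGet_none _ _ _ hidx] at h; omega
  | some k =>
    have hk := pvIdx_lt hidx
    rw [pvGet_some _ _ _ hidx, List.getD_eq_getElem _ _ hk] at h
    have : (-1 : Int) ∈ xs := h ▸ List.getElem_mem hk
    exact List.countP_pos_iff.mpr ⟨-1, this, by simp⟩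

lemma pvCountP_set (xs : List Int) (v : Int) : ∀ k : Nat, k < xs.length → xs.getD k (-2) = -1 →
    (v == -1) = false → (xs.set k v).countP (fun z => z == -1) + 1 = xs.countP (fun z => z == -1) := by
  induction xs with
  | nil => intro k hk; simp at hk
  | cons a t ih =>
    intro k hk ha hv
    cases k with
    | zero => simp_all
    | succ k =>
      simp only [List.set_cons_succ, List.countP_cons]
      have := ih k (by simpa using hk) (by simpa using ha) hv
      omega

lemma pvCountP_set_le (xs : List Int) (v : Int) (k : Nat) (hv : (v == -1) = false) :
    (xs.set k v).countP (fun z => z == -1) ≤ xs.countP (fun z => z == -1) := by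
  induction xs generalizing k with
  | nil => simp
  | cons a t ih =>
    cases k with
    | zero => simp [List.countP_cons, hv]
    | succ k => simp only [List.set_cons_succ, List.countP_cons]; have := ih k; omega

lemma pvCN_mark (xs : List Int) (i d' : Int) (h : PySem.List.pyGetD xs i (-2) = -1)
    (hd : d' ≠ -1) : pvCN (PySem.List.pySetD xs i d') + 1 = pvCN xs := by
  cases hidx : PySem.List.pyIdx? xs.length i with
  | none => rw [pvGet_none _ _ _ hidx] at h; omega
  | some k =>
    have hk := pvIdx_lt hidx
    rw [pvGet_some _ _ _ hidx] at h
    rw [pvSet_some _ _ _ hidx]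
    exact pvCountP_set xs d' k hk h (by simpa using hd)

lemma pvCN_set_le (xs : List Int) (i d' : Int) (hd : d' ≠ -1) :
    pvCN (PySem.List.pySetD xs i d') ≤ pvCN xs := by
  cases hidx : PySem.List.pyIdx? xs.length i with
  | none => rw [pvSet_none _ _ _ hidx]
  | some k => rw [pvSet_some _ _ _ hidx]; exact pvCountP_set_le xs d' k (by simpa using hd)

lemma pvMono_set (xs : List Int) (i d' x : Int) (hd : d' ≠ -1)
    (h : PySem.List.pyGetD xs x (-2) ≠ -1) :
    PySem.List.pyGetD (PySem.List.pySetD xs i d') x (-2) ≠ -1 := by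
  cases hidx : PySem.List.pyIdx? xs.length i with
  | none => rwa [pvSet_none _ _ _ hidx]
  | some k =>
    rw [pvSet_some _ _ _ hidx]
    have hlen : (xs.set k d').length = xs.length := by simp
    cases hx : PySem.List.pyIdx? xs.length x with
    | none => rw [pvGet_none _ _ _ (by rw [hlen]; exact hx)]; omega
    | some m =>
      rw [pvGet_some _ _ _ (by rw [hlen]; exact hx)]
      rw [pvGet_some _ _ _ hx] at h
      by_cases hkm : k = m
      · subst hkm
        rw [List.getD_eq_getElem _ _ (by simpa using pvIdx_lt hx), List.getElem_set_self]
        exact hd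
      · rwa [List.getD_eq_getElem?_getD, List.getElem?_set_ne hkm, ← List.getD_eq_getElem?_getD]

-- visited vertices stay visited through A's dfs, and the unvisited count never grows
lemma pvDfs_mono_cn (g : List (List Int)) : ∀ f : Nat,
    (∀ (n d : Int) (depth : List Int), 0 ≤ d →
      (∀ x, PySem.List.pyGetD depth x (-2) ≠ -1 → PySem.List.pyGetD (pvDfs g f n d depth) x (-2) ≠ -1)
      ∧ pvCN (pvDfs g f n d depth) ≤ pvCN depth)
    ∧ (∀ (lst : List Int) (d : Int) (depth : List Int), 0 ≤ d →
      (∀ x, PySem.List.pyGetD depth x (-2) ≠ -1 → PySem.List.pyGetD (pvDfsList g f lst d depth) x (-2) ≠ -1)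
      ∧ pvCN (pvDfsList g f lst d depth) ≤ pvCN depth) := by
  intro f
  induction f with
  | zero =>
    constructor
    · intro n d depth hd
      constructor
      · intro x hx; simpa [pvDfs] using hx
      · simp [pvDfs]
    · intro lst d depth hd
      induction lst generalizing depth with
      | nil => exact ⟨fun x hx => by simpa [pvDfsList] using hx, by simp [pvDfsList]⟩
      | cons a r ihl =>
        by_cases hc : PySem.List.pyGetD depth a (-2) = -1
        · have h0 : pvDfs g 0 a (d + 1) depth = depth := by simp [pvDfs]
          refine ⟨fun x hx => ?_, ?_⟩
          · rw [pvDfsList, if_pos hc, h0]; exact (ihl depth).1 x hx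
          · rw [pvDfsList, if_pos hc, h0]; exact (ihl depth).2
        · refine ⟨fun x hx => ?_, ?_⟩
          · rw [pvDfsList, if_neg hc]; exact (ihl depth).1 x hx
          · rw [pvDfsList, if_neg hc]; exact (ihl depth).2
  | succ f ih =>
    have hP : ∀ (n d : Int) (depth : List Int), 0 ≤ d →
        (∀ x, PySem.List.pyGetD depth x (-2) ≠ -1 → PySem.List.pyGetD (pvDfs g (f + 1) n d depth) x (-2) ≠ -1)
        ∧ pvCN (pvDfs g (f + 1) n d depth) ≤ pvCN depth := by
      intro n d depth hd
      have hset := ih.2 (PySem.List.pyGetD g n []) d (PySem.List.pySetD depth n d) hd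
      constructor
      · intro x hx
        rw [pvDfs]
        exact hset.1 x (pvMono_set depth n d x (by omega) hx)
      · rw [pvDfs]
        exact le_trans hset.2 (pvCN_set_le depth n d (by omega))
    refine ⟨hP, ?_⟩
    intro lst d depth hd
    induction lst generalizing depth with
    | nil => exact ⟨fun x hx => by simpa [pvDfsList] using hx, by simp [pvDfsList]⟩
    | cons a r ihl =>
      by_cases hc : PySem.List.pyGetD depth a (-2) = -1
      · have hrec := hP a (d + 1) depth (by omega)
        have hr := ihl (pvDfs g (f + 1) a (d + 1) depth)
        refine ⟨fun x hx => ?_, ?_⟩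
        · rw [pvDfsList, if_pos hc]; exact hr.1 x (hrec.1 x hx)
        · rw [pvDfsList, if_pos hc]; exact le_trans hr.2 hrec.2
      · refine ⟨fun x hx => ?_, ?_⟩
        · rw [pvDfsList, if_neg hc]; exact (ihl depth).1 x hx
        · rw [pvDfsList, if_neg hc]; exact (ihl depth).2

-- reversed-order conditional pushes = filter-then-map prepended to the old stack
lemma pvPush_eq (lst : List Int) (S : List (Int × Int)) (dd : Int) (dp : List Int) :
    lst.reverse.foldl (fun s nxt => if PySem.List.pyGetD dp nxt (-2) = -1 then (nxt, dd) :: s else s) S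
    = (lst.filter (fun nxt => PySem.List.pyGetD dp nxt (-2) == -1)).map (fun nxt => (nxt, dd)) ++ S := by
  rw [List.foldl_reverse]
  induction lst with
  | nil => simp
  | cons a r ih =>
    by_cases h : PySem.List.pyGetD dp a (-2) = -1
    · simp [h, ih]
    · simp [h, ih]

-- popping an already-visited vertex just discards the frame, whatever the fuel
lemma pvRun_skip (g : List (List Int)) (f : Nat) (depth : List Int) (n d : Int)
    (S : List (Int × Int)) (h : PySem.List.pyGetD depth n (-2) ≠ -1) :
    pvRun g f depth ((n, d) :: S) = pvRun g f depth S := by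
  cases f with
  | zero => rw [pvRun, if_pos h]
  | succ f' => rw [pvRun, if_pos h]

-- the stack loop's value does not depend on the fuel once the fuel exceeds the unvisited count
lemma pvRun_mono (g : List (List Int)) : ∀ (f f' : Nat) (depth : List Int) (S : List (Int × Int)),
    pvCN depth < f → pvCN depth < f' → pvOK S → pvRun g f depth S = pvRun g f' depth S := by
  intro f
  induction f with
  | zero => intro f' depth S hf; omega
  | succ f ihf =>
    intro f' depth S hf hf'
    induction S with
    | nil => intro _; rw [pvRun, pvRun]
    | cons p S' ihS =>
      intro hS
      obtain ⟨node, d⟩ := p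
      have hS' : pvOK S' := fun q hq => hS q (List.mem_cons_of_mem _ hq)
      by_cases hc : PySem.List.pyGetD depth node (-2) = -1
      · have hd : 0 ≤ d := hS (node, d) List.mem_cons_self
        have h1 : 1 ≤ pvCN depth := pvCN_pos _ _ hc
        have hcn : pvCN (PySem.List.pySetD depth node d) + 1 = pvCN depth :=
          pvCN_mark depth node d hc (by omega)
        cases f' with
        | zero => omega
        | succ f'' =>
          rw [pvRun, pvRun, if_neg (by simpa using hc), if_neg (by simpa using hc)]
          simp only
          rw [pvPush_eq]
          apply ihf
          · omega
          · omega
          · intro q hq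
            rcases List.mem_append.mp hq with hq | hq
            · obtain ⟨x, _, rfl⟩ := List.mem_map.mp hq
              have : (0:Int) ≤ d + 1 := by omega
              simpa using this
            · exact hS' q hq
      · rw [pvRun_skip g _ depth node d S' hc, pvRun_skip g _ depth node d S' hc]
        exact ihS hS'

-- the simulation: popping (n,d) with n unvisited behaves like the recursive call dfs(n,d)
lemma pvMaster (g : List (List Int)) : ∀ (k : Nat) (depth : List Int) (n d : Int)
    (S : List (Int × Int)) (fA fS : Nat),
    pvCN depth ≤ k → PySem.List.pyGetD depth n (-2) = -1 → 0 ≤ d → pvOK S →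
    pvCN depth < fA → pvCN depth < fS →
    pvRun g fS depth ((n, d) :: S) = pvRun g fS (pvDfs g fA n d depth) S := by
  intro k
  induction k using Nat.strong_induction_on with
  | _ k IH =>
  intro depth n d S fA fS hk hn hd hS hfA hfS
  have h1 : 1 ≤ pvCN depth := pvCN_pos _ _ hn
  cases fA with
  | zero => omega
  | succ a =>
  cases fS with
  | zero => omega
  | succ s =>
  have hd' : (d : Int) ≠ -1 := by omega
  have hcn : pvCN (PySem.List.pySetD depth n d) + 1 = pvCN depth := pvCN_mark depth n d hn hd'
  set dp := PySem.List.pySetD depth n d with hdp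
  -- unfold the popped frame on the left
  rw [pvRun, if_neg (by simpa using hn)]
  simp only
  rw [pvPush_eq]
  -- unfold the recursive call on the right
  rw [pvDfs]
  -- the inner simulation: one frame of dfs's neighbour loop at a time
  have hml : ∀ (lst : List Int) (depthc : List Int),
      (∀ x, PySem.List.pyGetD dp x (-2) ≠ -1 → PySem.List.pyGetD depthc x (-2) ≠ -1) →
      pvCN depthc ≤ pvCN dp →
      pvRun g s depthc
        ((lst.filter (fun nxt => PySem.List.pyGetD dp nxt (-2) == -1)).map (fun nxt => (nxt, d + 1)) ++ S)
      = pvRun g s (pvDfsList g a lst d depthc) S := by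
    intro lst
    induction lst with
    | nil =>
      intro depthc _ _
      simp only [List.filter_nil, List.map_nil, List.nil_append]
      rw [pvDfsList]
    | cons x rest ihl =>
      intro depthc hH hcc
      by_cases hx : PySem.List.pyGetD dp x (-2) = -1
      · by_cases hxc : PySem.List.pyGetD depthc x (-2) = -1
        · have hstep := IH (pvCN depthc) (by omega) depthc x (d + 1)
            ((rest.filter (fun nxt => PySem.List.pyGetD dp nxt (-2) == -1)).map (fun nxt => (nxt, d + 1)) ++ S)
            a s le_rfl hxc (by omega)
            (by
              intro q hq
              rcases List.mem_append.mp hq with hq | hq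
              · obtain ⟨y, _, rfl⟩ := List.mem_map.mp hq
                have : (0:Int) ≤ d + 1 := by omega
                simpa using this
              · exact hS q hq)
            (by omega) (by omega)
          have hmono := (pvDfs_mono_cn g a).1 x (d + 1) depthc (by omega)
          rw [List.filter_cons_of_pos (by simpa using hx), List.map_cons, List.cons_append, hstep,
            pvDfsList, if_pos hxc]
          exact ihl (pvDfs g a x (d + 1) depthc) (fun y hy => hmono.1 y (hH y hy))
            (le_trans hmono.2 hcc)
        · rw [List.filter_cons_of_pos (by simpa using hx), List.map_cons, List.cons_append,
            pvRun_skip g s depthc x (d + 1) _ hxc, pvDfsList, if_neg hxc]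
          exact ihl depthc hH hcc
      · rw [List.filter_cons_of_neg (by simpa using hx), pvDfsList, if_neg (hH x hx)]
        exact ihl depthc hH hcc
  have hml' := hml (PySem.List.pyGetD g n []) dp (fun x hx => hx) le_rfl
  rw [hml']
  -- renormalise the fuel on the left (s instead of s+1)
  have hcnles : pvCN (pvDfsList g a (PySem.List.pyGetD g n []) d dp) ≤ pvCN dp :=
    ((pvDfs_mono_cn g a).2 (PySem.List.pyGetD g n []) d dp hd).2
  exact pvRun_mono g s (s + 1) _ S (by omega) (by omega) hS

-- ===== VERDICT (by name: the statement is the Claim_ definition above) =====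
theorem dfs_depths_spec : Claim_equal_dfs_depths := by
  intro N M R edges _ hpre
  obtain ⟨hN, ⟨hR1, hR2⟩, _hE⟩ := hpre
  unfold Spec_dfs_depths
  simp only [dfs_depths, dfs_depths_alt]
  set g := pvGraph N edges with hg
  set depth0 : List Int := List.replicate (N + 1).toNat (-1) with hdepth0
  have hlen : depth0.length = (N + 1).toNat := by simp [hdepth0]
  have hidx : ∃ k, PySem.List.pyIdx? depth0.length R = some k := by
    rw [hlen]
    simp only [PySem.List.pyIdx?]
    split_ifs with h1 h2 h3
    · exact ⟨_, rfl⟩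
    · exfalso; omega
    · exact ⟨_, rfl⟩
    · exfalso; omega
  obtain ⟨k, hk⟩ := hidx
  have hklt : k < depth0.length := pvIdx_lt hk
  have hn : PySem.List.pyGetD depth0 R (-2) = -1 := by
    rw [pvGet_some _ _ _ hk, List.getD_eq_getElem _ _ hklt]
    simp [hdepth0]
  have hcn : pvCN depth0 < depth0.length + 1 := by
    have := List.countP_le_length (p := fun z : Int => z == -1) (l := depth0)
    unfold pvCN; omega
  have hok : pvOK ([] : List (Int × Int)) := by intro p hp; cases hp
  have hmain := pvMaster g (pvCN depth0) depth0 R 0 [] (depth0.length + 1) (depth0.length + 1)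
    le_rfl hn le_rfl hok hcn hcn
  rw [pvRun] at hmain
  rw [← hmain]
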